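-- pv_equiv track=rewrite | github.com/juadHamdan/Sadna-2021-MTA-Scheduler | Sadna2021/api/pdfExtraction.py | findIndexOfColumnNameInLine
-- ===== SOURCE A (Python) =====
-- def findIndexOfColumnNameInLine(line, optionalColumnNames):
--     i = len(line) - 1
--     while i >= 0:
--         for optionalColumnName in optionalColumnNames:
--             if line[i] and optionalColumnName in line[i]:
--                 return i
--         i -= 1
--     return None
-- ===== SOURCE B (Python) =====
-- def findIndexOfColumnNameInLine(line, optionalColumnNames):
--     result = None
--     for i, entry in enumerate(line):
--         if entry and any(name in entry for name in optionalColumnNames):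
--             result = i
--     return result
-- ===== Notes on version B (the rewrite author's own statement) =====
-- stated objective: alternative
-- what changed: Replaces A's backward while-loop with early return on the first match by a single forward enumerate pass that threads a last-match accumulator and never breaks.
import Mathlib
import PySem

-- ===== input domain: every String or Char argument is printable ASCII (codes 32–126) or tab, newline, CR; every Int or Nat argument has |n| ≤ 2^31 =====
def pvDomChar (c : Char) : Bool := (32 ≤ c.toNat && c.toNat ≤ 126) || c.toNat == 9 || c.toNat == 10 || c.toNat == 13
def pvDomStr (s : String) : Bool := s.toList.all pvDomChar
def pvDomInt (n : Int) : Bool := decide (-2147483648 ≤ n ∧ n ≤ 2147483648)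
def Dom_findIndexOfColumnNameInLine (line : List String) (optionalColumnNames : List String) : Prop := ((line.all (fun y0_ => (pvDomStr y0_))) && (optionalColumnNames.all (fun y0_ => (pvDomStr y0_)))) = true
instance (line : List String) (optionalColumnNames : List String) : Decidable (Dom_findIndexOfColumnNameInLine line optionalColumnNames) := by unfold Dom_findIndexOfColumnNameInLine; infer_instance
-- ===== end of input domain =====

-- B replaces A's backward early-return scan by a forward pass threading a last-match accumulator (alternative decomposition, same cost).
-- ===== PORT A =====
-- while loop 'i = len(line)-1; while i >= 0: ... i -= 1', recursion on k = i+1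
def pvALoop (line : List String) (optionalColumnNames : List String) : Nat → Option Int
  | 0 => none
  | k + 1 =>
    let entry := line.getD k ""
    -- 'for optionalColumnName in optionalColumnNames: if line[i] and optionalColumnName in line[i]: return i'
    match optionalColumnNames.find? (fun nm => decide (entry ≠ "") && PySem.Str.isIn nm entry) with
    | some _ => some (k : Int)
    | none => pvALoop line optionalColumnNames k

def findIndexOfColumnNameInLine (line : List String) (optionalColumnNames : List String) : Option Int :=
  pvALoop line optionalColumnNames line.length

-- ===== PORT B =====
-- 'result = None; for i, entry in enumerate(line): if entry and any(...): result = i; return result'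
def findIndexOfColumnNameInLine_alt (line : List String) (optionalColumnNames : List String) : Option Int :=
  (PySem.List.enumerate line).foldl
    (fun result p =>
      if decide (p.2 ≠ "") && optionalColumnNames.any (fun name => PySem.Str.isIn name p.2) then some p.1
      else result)
    none

-- ===== PRECONDITION & SPEC =====
def Spec_findIndexOfColumnNameInLine (line : List String) (optionalColumnNames : List String) (out : Option Int) : Prop := out = findIndexOfColumnNameInLine_alt line optionalColumnNames
instance (line : List String) (optionalColumnNames : List String) (out : Option Int) : Decidable (Spec_findIndexOfColumnNameInLine line optionalColumnNames out) := by unfold Spec_findIndexOfColumnNameInLine; infer_instance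

-- ===== CLAIM (what is proved, stated in full; the proofs are below) =====
def Claim_equal_findIndexOfColumnNameInLine : Prop := ∀ (line : List String) (optionalColumnNames : List String), Dom_findIndexOfColumnNameInLine line optionalColumnNames → Spec_findIndexOfColumnNameInLine line optionalColumnNames (findIndexOfColumnNameInLine line optionalColumnNames)

-- ===== LEMMAS AND PROOFS =====

-- ===== VERDICT (by name: the statement is the Claim_ definition above) =====
lemma pv_find?_isSome_eq_any {α : Type} (p : α → Bool) (l : List α) :
    (l.find? p).isSome = l.any p := by
  induction l with
  | nil => rfl
  | cons x xs ih => by_cases h : p x <;> simp [h, ih]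

-- the two loop conditions are the same Bool
lemma pv_cond_eq (names : List String) (e : String) :
    (names.find? (fun nm => decide (e ≠ "") && PySem.Str.isIn nm e)).isSome
      = (decide (e ≠ "") && names.any (fun nm => PySem.Str.isIn nm e)) := by
  rw [pv_find?_isSome_eq_any]
  by_cases h : e = "" <;> simp [h]

-- pvALoop only looks at indices below k
lemma pvALoop_congr (l₁ l₂ names : List String) (k : Nat)
    (h : ∀ i, i < k → l₁.getD i "" = l₂.getD i "") :
    pvALoop l₁ names k = pvALoop l₂ names k := by
  induction k with
  | zero => rfl
  | succ k ih =>
    simp only [pvALoop, h k (Nat.lt_succ_self k)]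
    rw [ih (fun i hi => h i (Nat.lt_succ_of_lt hi))]

lemma pv_main (names line : List String) :
    pvALoop line names line.length = findIndexOfColumnNameInLine_alt line names := by
  induction line using List.reverseRecOn with
  | nil => rfl
  | append_singleton l x ih =>
    have hstep : findIndexOfColumnNameInLine_alt (l ++ [x]) names
        = (if decide (x ≠ "") && names.any (fun name => PySem.Str.isIn name x)
            then some (l.length : Int) else findIndexOfColumnNameInLine_alt l names) := by
      simp [findIndexOfColumnNameInLine_alt, PySem.List.enumerate_append,
            PySem.List.enumerate_cons, PySem.List.enumerate_nil, List.foldl_append]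
    rw [hstep, ← ih]
    have hlen : (l ++ [x]).length = l.length + 1 := by simp
    rw [hlen]
    have hget : (l ++ [x]).getD l.length "" = x := by
      simp [List.getD]
    have hcongr : pvALoop (l ++ [x]) names l.length = pvALoop l names l.length := by
      apply pvALoop_congr
      intro i hi
      simp [List.getD, List.getElem?_append_left hi]
    have hc := pv_cond_eq names x
    simp only [pvALoop, hget]
    rcases hfind : names.find? (fun nm => decide (x ≠ "") && PySem.Str.isIn nm x) with _ | nm
    · have : (decide (x ≠ "") && names.any (fun nm => PySem.Str.isIn nm x)) = false := by
        rw [← hc, hfind]; rfl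
      rw [this]; simp [hcongr]
    · have : (decide (x ≠ "") && names.any (fun nm => PySem.Str.isIn nm x)) = true := by
        rw [← hc, hfind]; rfl
      rw [this]; simp

theorem findIndexOfColumnNameInLine_spec : Claim_equal_findIndexOfColumnNameInLine := by
  intro line names _
  unfold Spec_findIndexOfColumnNameInLine findIndexOfColumnNameInLine
  exact pv_main names line
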